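-- pv_equiv track=rewrite | github.com/raki-1203/boostcamp_note | Coding_Solve/20210907/110 옮기기.py | solution
-- ===== SOURCE A (Python) =====
-- from collections import deque
--
-- def solution(s):
--     answer = []
--     for x in s:
--         stack = []
--         count = 0
--         for string in x:
--             # 문자열이 0이면
--             if string == '0':
--                 # 앞에 2개가 1, 1인지 확인
--                 if stack[-2:] == ['1', '1']:
--                     count += 1
--                     stack.pop()
--                     stack.pop()
--
--                 # 앞에 2개가 1, 1이 아니면 그냥 0을 추가
--                 else:
--                     stack.append(string)
--                     # 문자열이 0이 아니면 그냥 추가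
--             else:
--                 stack.append(string)
--
--         # 110이 없기 때문에 변화 불가능
--         if count == 0:
--             answer.append(x)
--
--         # 110이 있다면
--         else:
--             final = deque()
--
--             # 0이 나오기 전까지는 append
--             while stack:
--                 if stack[-1] == '1':
--                     final.append(stack.pop())
--                 elif stack[-1] == '0':
--                     break
--
--             # 0이 나왔다면 110을 주어진 count 만큼 append
--             while count > 0:
--                 final.appendleft('0')
--                 final.appendleft('1')
--                 final.appendleft('1')
--                 count -= 1
--
--             # stack에 남아있는거 다 추가
--             while stack:
--                 final.appendleft(stack.pop())
--             answer.append(''.join(final))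
--
--     return answer
-- ===== SOURCE B (Python) =====
-- def solution(s):
--     answer = []
--     for x in s:
--         # Fixpoint rewriting: repeatedly delete the leftmost '110'.  The one-word
--         # deletion system has no self-overlap, so it is confluent: the normal form
--         # and the number of deletions are independent of the deletion order.
--         t = x
--         cnt = 0
--         while True:
--             i = t.find('110')
--             if i == -1:
--                 break
--             t = t[:i] + t[i + 3:]
--             cnt += 1
--         # Re-insert the removed '110' blocks right after the last '0'.
--         j = t.rfind('0') + 1
--         answer.append(t[:j] + '110' * cnt + t[j:])
--     return answer
-- ===== Notes on version B (the rewrite author's own statement) =====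
-- stated objective: alternative
-- what changed: Replaces A's single-pass stack reduction plus three-while-loop deque reconstruction by fixpoint rewriting: repeatedly delete the leftmost '110' with str.find (correct since the one-word deletion system has no self-overlap, hence is confluent), then insert '110'*count right after the last '0' found with rfind.
-- outside the precondition, e.g. on solution(['110z0']): A returns ['z0110'], B returns ['z0110']
import Mathlib
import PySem

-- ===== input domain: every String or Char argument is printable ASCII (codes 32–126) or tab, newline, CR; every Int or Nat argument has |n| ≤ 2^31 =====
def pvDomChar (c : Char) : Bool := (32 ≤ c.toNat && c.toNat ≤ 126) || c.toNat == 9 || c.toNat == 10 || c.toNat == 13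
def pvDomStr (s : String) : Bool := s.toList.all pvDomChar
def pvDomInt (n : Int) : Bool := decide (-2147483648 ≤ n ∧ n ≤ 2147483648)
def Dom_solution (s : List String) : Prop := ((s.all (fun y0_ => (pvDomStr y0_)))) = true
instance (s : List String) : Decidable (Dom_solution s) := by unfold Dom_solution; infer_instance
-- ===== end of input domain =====

-- B replaces A's single-pass stack reduction and three-while-loop deque reconstruction by
-- fixpoint rewriting (repeatedly delete the leftmost '110' via str.find, then insert
-- '110'*count after the last '0' via rfind) — a different algorithm of the same function.

-- ===== PORT A =====
-- The Python stack (append/pop at the right end) is kept head-at-top: push = cons, pop = tail;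
-- 'stack[-2:] == ["1","1"]' is then 'take 2 = ['1','1']' (a two-element run of '1' reads the same both ways).
def aStep (st : List Char × Nat) (c : Char) : List Char × Nat :=
  if c = '0' then
    if st.1.take 2 = ['1', '1'] then (st.1.drop 2, st.2 + 1)
    else (c :: st.1, st.2)
  else (c :: st.1, st.2)

-- first while-loop: pop '1's into final (deque.append = append at the right); on '0' break.
-- On any other top character Python never pops and loops forever: those inputs are excluded
-- by Pre_solution; the port breaks there.
def aPop : List Char → List Char → List Char × List Char
  | [], final => (final, [])
  | c :: rest, final =>
    if c = '1' then aPop rest (final ++ [c])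
    else (final, c :: rest)

-- second while-loop: appendleft '0','1','1' count times
def aPrepend110 : Nat → List Char → List Char
  | 0, final => final
  | n + 1, final => aPrepend110 n ('1' :: '1' :: '0' :: final)

-- third while-loop: appendleft(stack.pop()) until empty
def aDump : List Char → List Char → List Char
  | [], final => final
  | c :: rest, final => aDump rest (c :: final)

def solution (s : List String) : List String :=
  s.map (fun x =>
    let r := x.toList.foldl aStep ([], 0)
    if r.2 = 0 then x
    else
      let p := aPop r.1 []
      String.ofList (aDump p.2 (aPrepend110 r.2 p.1)))

-- ===== PORT B =====
-- Source B's while loop: i = t.find('110'); if i == -1 break; t = t[:i] + t[i+3:]; cnt += 1.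
-- (t[:i] / t[i+3:] with i = find ≥ 0 are List.take / List.drop — exact.)
def bLoop (t : List Char) (cnt : Nat) : List Char × Nat :=
  let i := PySem.Chars.find t ['1', '1', '0']
  if h : i = -1 then (t, cnt)
  else bLoop (t.take i.toNat ++ t.drop (i.toNat + 3)) (cnt + 1)
termination_by t.length
decreasing_by
  have hge := PySem.Chars.neg_one_le_find (s := t) (sub := ['1', '1', '0'])
  have h0 : 0 ≤ PySem.Chars.find t ['1', '1', '0'] := by omega
  have hsp := (PySem.Chars.find_spec (s := t) (sub := ['1', '1', '0']) h0).1
  have hlen : 3 ≤ (t.drop (PySem.Chars.find t ['1', '1', '0']).toNat).length := by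
    simpa using hsp.length_le
  have hfl : (PySem.Chars.find t ['1', '1', '0']).toNat ≤ t.length := by
    have := PySem.Chars.find_le_length (s := t) (sub := ['1', '1', '0'])
    omega
  simp only [List.length_append, List.length_take, List.length_drop] at *
  omega

def solution_alt (s : List String) : List String :=
  s.map (fun x =>
    let r := bLoop x.toList 0
    -- j = t.rfind('0') + 1 is ≥ 0, so t[:j] / t[j:] are take / drop — exact.
    let j := (PySem.Chars.rfind r.1 ['0'] + 1).toNat
    String.ofList (r.1.take j ++ (List.replicate r.2 ['1', '1', '0']).flatten ++ r.1.drop j))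

-- ===== PRECONDITION & SPEC =====
-- Pre_ excludes strings containing "110" together with a character other than '0'/'1': on part
-- of those (e.g. ["110a"]) A's first while-loop never pops and Python A loops forever; the
-- exclusion is slightly wider than the exact divergence set (cited example: ["110z0"]).
def Pre_solution (s : List String) : Prop :=
  (s.all (fun x => !PySem.Str.isIn "110" x ||
                   x.toList.all (fun c => c == '0' || c == '1'))) = true
instance (s : List String) : Decidable (Pre_solution s) := by unfold Pre_solution; infer_instance
def pvWitness_solution : List String := ["110", "0"]
def Spec_solution (s : List String) (out : List String) : Prop := out = solution_alt s
instance (s : List String) (out : List String) : Decidable (Spec_solution s out) := by unfold Spec_solution; infer_instance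

-- ===== CLAIM (what is proved, stated in full; the proofs are below) =====
def Claim_equal_solution : Prop := ∀ (s : List String), Dom_solution s → Pre_solution s → Spec_solution s (solution s)

-- ===== LEMMAS AND PROOFS =====

-- the count component of the fold is a pure accumulator
theorem aStep_shift (st : List Char) (n : Nat) (c : Char) :
    aStep (st, n) c = ((aStep (st, 0) c).1, n + (aStep (st, 0) c).2) := by
  unfold aStep; split_ifs <;> simp

theorem foldl_shift (l : List Char) (st : List Char) (n : Nat) :
    l.foldl aStep (st, n) = ((l.foldl aStep (st, 0)).1, n + (l.foldl aStep (st, 0)).2) := by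
  induction l generalizing st n with
  | nil => simp
  | cons c rest ih =>
    rcases h : aStep (st, 0) c with ⟨st1, k⟩
    rw [List.foldl_cons, List.foldl_cons, aStep_shift st n c, h]
    rw [ih st1 k, ih st1 (n + k)]
    simp [Nat.add_assoc]

-- processing '1','1','0' from any state deletes the triple and bumps the count
theorem step110 (v : List Char) (st : List Char) (n : Nat) :
    (('1' :: '1' :: '0' :: v)).foldl aStep (st, n) = v.foldl aStep (st, n + 1) := by
  simp [aStep]

-- deleting one '110' occurrence anywhere leaves the reduced stack unchanged and the count one higher
theorem foldl_delete (u v : List Char) (st : List Char) (n : Nat) :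
    (u ++ ['1', '1', '0'] ++ v).foldl aStep (st, n) =
      (((u ++ v).foldl aStep (st, n)).1, ((u ++ v).foldl aStep (st, n)).2 + 1) := by
  rw [List.append_assoc, List.foldl_append, List.foldl_append, List.foldl_append]
  rcases h : u.foldl aStep (st, n) with ⟨st1, k⟩
  show (('1' :: '1' :: '0' :: v)).foldl aStep (st1, k) = _
  rw [step110, foldl_shift v st1 (k + 1), foldl_shift v st1 k]
  simp only [Prod.mk.injEq, true_and]
  omega

-- on a '110'-free input the fold just pushes everything
theorem foldl_nf (t : List Char) (st : List Char) (n : Nat)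
    (h : ¬ (['1', '1', '0'] <:+: (st.reverse ++ t))) :
    t.foldl aStep (st, n) = (t.reverse ++ st, n) := by
  induction t generalizing st with
  | nil => simp
  | cons c rest ih =>
    have hpush : aStep (st, n) c = (c :: st, n) := by
      unfold aStep
      split_ifs with h1 h2
      · exfalso
        subst h1
        rcases st with _ | ⟨a, _ | ⟨b, st2⟩⟩ <;> simp_all
        obtain ⟨rfl, rfl⟩ := h2
        exact h ⟨st2.reverse, rest, by simp⟩
      · rfl
      · rfl
    rw [List.foldl_cons, hpush, ih (c :: st) (by simpa using h)]
    simp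

-- a successful find decomposes the list at the occurrence
theorem find_decomp (t : List Char) (h : PySem.Chars.find t ['1', '1', '0'] ≠ -1) :
    t = t.take (PySem.Chars.find t ['1', '1', '0']).toNat ++ ['1', '1', '0'] ++
        t.drop ((PySem.Chars.find t ['1', '1', '0']).toNat + 3) := by
  have hge := PySem.Chars.neg_one_le_find (s := t) (sub := ['1', '1', '0'])
  have h0 : 0 ≤ PySem.Chars.find t ['1', '1', '0'] := by omega
  have hsp := (PySem.Chars.find_spec (s := t) (sub := ['1', '1', '0']) h0).1
  set i := (PySem.Chars.find t ['1', '1', '0']).toNat with hi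
  obtain ⟨w, hw⟩ := hsp
  have hdrop3 : t.drop (i + 3) = w := by
    have : (t.drop i).drop 3 = w := by rw [← hw]; simp
    simpa [List.drop_drop, Nat.add_comm] using this
  conv_lhs => rw [← List.take_append_drop i t]
  rw [← hw, hdrop3, List.append_assoc]

-- bLoop computes the reversed reduced stack and the deletion count of the fold
theorem bLoop_none (t : List Char) (cnt : Nat)
    (hi : PySem.Chars.find t ['1', '1', '0'] = -1) : bLoop t cnt = (t, cnt) := by
  rw [bLoop]; simp only [hi]; simp

theorem bLoop_step (t : List Char) (cnt : Nat)
    (hi : ¬ PySem.Chars.find t ['1', '1', '0'] = -1) :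
    bLoop t cnt = bLoop (t.take (PySem.Chars.find t ['1', '1', '0']).toNat ++
      t.drop ((PySem.Chars.find t ['1', '1', '0']).toNat + 3)) (cnt + 1) := by
  rw [bLoop]; simp only [hi]; simp

theorem bLoop_spec_aux (N : Nat) : ∀ (t : List Char) (cnt : Nat), t.length ≤ N →
    (bLoop t cnt).1.reverse = (t.foldl aStep ([], 0)).1 ∧
    (bLoop t cnt).2 = cnt + (t.foldl aStep ([], 0)).2 := by
  induction N with
  | zero =>
    intro t cnt h
    have ht : t = [] := List.length_eq_zero_iff.mp (Nat.le_zero.mp h)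
    subst ht
    rw [bLoop_none [] cnt (by decide)]
    simp
  | succ N ih =>
    intro t cnt h
    by_cases hi : PySem.Chars.find t ['1', '1', '0'] = -1
    · have hnone : ¬ (['1', '1', '0'] <:+: t) :=
        (PySem.Chars.find_eq_neg_one_iff (s := t) (sub := ['1', '1', '0'])).mp hi
      rw [bLoop_none t cnt hi, foldl_nf t [] 0 (by simpa using hnone)]
      simp
    · have hdec := find_decomp t hi
      have hfold := foldl_delete (t.take (PySem.Chars.find t ['1', '1', '0']).toNat)
        (t.drop ((PySem.Chars.find t ['1', '1', '0']).toNat + 3)) [] 0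
      rw [← hdec] at hfold
      have hlen : (t.take (PySem.Chars.find t ['1', '1', '0']).toNat ++
          t.drop ((PySem.Chars.find t ['1', '1', '0']).toNat + 3)).length ≤ N := by
        have := congrArg List.length hdec
        simp only [List.length_append, List.length_cons, List.length_nil] at this ⊢
        omega
      have := ih _ (cnt + 1) hlen
      rw [bLoop_step t cnt hi, hfold]
      exact ⟨this.1, by rw [this.2]; omega⟩

-- bLoop computes the reversed reduced stack and the deletion count of the fold
theorem bLoop_spec (t : List Char) (cnt : Nat) :
    (bLoop t cnt).1.reverse = (t.foldl aStep ([], 0)).1 ∧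
    (bLoop t cnt).2 = cnt + (t.foldl aStep ([], 0)).2 :=
  bLoop_spec_aux t.length t cnt le_rfl

-- every character of the reduced stack comes from the initial stack or the input
theorem foldl_mem (l : List Char) (st : List Char) (n : Nat) (c : Char)
    (h : c ∈ (l.foldl aStep (st, n)).1) : c ∈ st ∨ c ∈ l := by
  induction l generalizing st n with
  | nil => simp_all
  | cons d rest ih =>
    rw [List.foldl_cons] at h
    rcases hs : aStep (st, n) d with ⟨st1, k⟩
    rw [hs] at h
    have hsub : c ∈ st1 → c ∈ st ∨ c = d := by
      intro hc
      unfold aStep at hs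
      split_ifs at hs with h1 h2 <;>
        (rw [Prod.mk.injEq] at hs; obtain ⟨hst, -⟩ := hs; subst hst)
      · exact Or.inl (List.mem_of_mem_drop hc)
      · rcases List.mem_cons.mp hc with h' | h'
        · exact Or.inr (h'.trans rfl)
        · exact Or.inl h'
      · rcases List.mem_cons.mp hc with h' | h'
        · exact Or.inr h'
        · exact Or.inl h'
    rcases ih st1 k h with hmem | hmem
    · rcases hsub hmem with h' | h'
      · exact Or.inl h'
      · simp [h']
    · simp [hmem]


theorem go_zero (s : List Char) :
    PySem.Chars.rfind.go s ['0'] 0 = if ['0'].isPrefixOf s then 0 else -1 := by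
  simp [PySem.Chars.rfind.go]

theorem go_succ (s : List Char) (j : Nat) :
    PySem.Chars.rfind.go s ['0'] (j + 1) =
      if ['0'].isPrefixOf (s.drop (j + 1)) then ((j : Int) + 1) else PySem.Chars.rfind.go s ['0'] j := by
  simp [PySem.Chars.rfind.go]

-- go at fuel below the length of s agrees after appending a character
theorem go_append (c : Char) (s : List Char) : ∀ (k : Nat), k < s.length →
    PySem.Chars.rfind.go (s ++ [c]) ['0'] k = PySem.Chars.rfind.go s ['0'] k := by
  intro k
  induction k with
  | zero =>
    intro hk
    rcases s with _ | ⟨d, s'⟩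
    · simp at hk
    · simp [go_zero]
  | succ j ih =>
    intro hk
    have hdrop : (s ++ [c]).drop (j + 1) = s.drop (j + 1) ++ [c] := by
      rw [List.drop_append_of_le_length (by omega)]
    have hlen : (s.drop (j + 1)).length = s.length - (j + 1) := List.length_drop ..
    rcases hd : s.drop (j + 1) with _ | ⟨d, rest⟩
    · rw [hd] at hlen; simp at hlen; omega
    · rw [go_succ, go_succ, hdrop, hd, ih (by omega)]
      simp [List.isPrefixOf]

-- rfind('0') + 1 = length minus the length of the maximal '0'-free suffix
theorem rfind_zero_succ (t : List Char) :
    PySem.Chars.rfind t ['0'] + 1 = (t.length : Int) - (t.reverse.takeWhile (· ≠ '0')).length := by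
  induction t using List.reverseRecOn with
  | nil => simp [PySem.Chars.rfind, go_zero, List.isPrefixOf]
  | append_singleton s c ih =>
    have hfuel : (s ++ [c]).length = s.length + 1 := by simp
    have htop : PySem.Chars.rfind (s ++ [c]) ['0'] =
        PySem.Chars.rfind.go (s ++ [c]) ['0'] s.length := by
      unfold PySem.Chars.rfind
      rw [hfuel, go_succ]
      simp
    by_cases hc : c = '0'
    · subst hc
      have hval : PySem.Chars.rfind.go (s ++ ['0']) ['0'] s.length = s.length := by
        cases hn : s.length with
        | zero =>
          have hs : s = [] := List.length_eq_zero_iff.mp hn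
          subst hs
          simp [go_zero, List.isPrefixOf]
        | succ m =>
          rw [go_succ, ← hn, List.drop_append_of_le_length le_rfl, List.drop_length]
          simp [List.isPrefixOf, hn]
      rw [htop, hval]
      simp
    · have hdropc : (s ++ [c]).drop s.length = [c] := by
        rw [List.drop_append_of_le_length le_rfl, List.drop_length]
        simp
      have hstep : PySem.Chars.rfind (s ++ [c]) ['0'] = PySem.Chars.rfind s ['0'] := by
        rw [htop]
        cases hn : s.length with
        | zero =>
          have hs : s = [] := List.length_eq_zero_iff.mp hn
          subst hs
          simp [PySem.Chars.rfind, go_zero, List.isPrefixOf, Ne.symm hc]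
        | succ m =>
          rw [hn] at hdropc
          rw [go_succ, hdropc]
          have hpf : (['0'].isPrefixOf [c]) = false := by
            simp [List.isPrefixOf, Ne.symm hc]
          rw [hpf]
          simp only [Bool.false_eq_true, if_false]
          rw [go_append c s m (by omega)]
          -- rfind s = go s (len s) = go s m since drop (len s) s = []
          unfold PySem.Chars.rfind
          rw [show PySem.Chars.rfind.go s ['0'] s.length =
              PySem.Chars.rfind.go s ['0'] (m + 1) from by rw [hn]]
          rw [go_succ, ← hn, List.drop_length]
          simp [List.isPrefixOf]
      rw [hstep]
      simp only [List.reverse_append, List.reverse_singleton, List.singleton_append,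
        List.length_append, List.length_cons, List.length_nil]
      rw [List.takeWhile_cons_of_pos (by simpa using hc)]
      have hle : (s.reverse.takeWhile (· ≠ '0')).length ≤ s.length := by
        simpa using (List.takeWhile_sublist (l := s.reverse) (fun x => decide (x ≠ '0'))).length_le
      simp only [List.length_cons]
      push_cast
      omega


theorem aPop_eq (l acc : List Char) :
    aPop l acc = (acc ++ l.takeWhile (· = '1'), l.dropWhile (· = '1')) := by
  induction l generalizing acc with
  | nil => simp [aPop]
  | cons c rest ih =>
    by_cases h : c = '1' <;> simp [aPop, h, ih]

theorem aDump_eq (l final : List Char) : aDump l final = l.reverse ++ final := by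
  induction l generalizing final with
  | nil => simp [aDump]
  | cons c rest ih => simp [aDump, ih]

theorem aPrepend110_eq (n : Nat) (final : List Char) :
    aPrepend110 n final = (List.replicate n ['1', '1', '0']).flatten ++ final := by
  induction n generalizing final with
  | zero => simp [aPrepend110]
  | succ k ih =>
    rw [aPrepend110, ih, List.replicate_succ', List.flatten_append]
    simp

theorem takeWhile_ones_reverse (l : List Char) :
    (l.takeWhile (· = '1')).reverse = l.takeWhile (· = '1') := by
  have h : l.takeWhile (· = '1') = List.replicate (l.takeWhile (· = '1')).length '1' := by
    apply List.eq_replicate_of_mem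
    intro c hc
    simpa using List.mem_takeWhile_imp hc
  rw [h, List.reverse_replicate]

theorem aStep_count_le (st : List Char) (n : Nat) (c : Char) : n ≤ (aStep (st, n) c).2 := by
  unfold aStep; split_ifs <;> simp

theorem aStep_count_eq (st : List Char) (n : Nat) (c : Char)
    (h : (aStep (st, n) c).2 = n) : aStep (st, n) c = (c :: st, n) := by
  unfold aStep at h ⊢; split_ifs at h ⊢ <;> simp_all

theorem foldl_count_mono (l : List Char) (st : List Char) (n : Nat) :
    n ≤ (l.foldl aStep (st, n)).2 := by
  induction l generalizing st n with
  | nil => simp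
  | cons c rest ih =>
    rcases h : aStep (st, n) c with ⟨st1, n1⟩
    rw [List.foldl_cons, h]
    have := aStep_count_le st n c
    rw [h] at this
    exact le_trans this (ih st1 n1)

theorem count_zero_stack_gen (l : List Char) (st0 : List Char) (n0 : Nat)
    (h : (l.foldl aStep (st0, n0)).2 = n0) :
    (l.foldl aStep (st0, n0)).1 = l.reverse ++ st0 := by
  induction l generalizing st0 n0 with
  | nil => simp
  | cons c rest ih =>
    rcases hs : aStep (st0, n0) c with ⟨st1, n1⟩
    rw [List.foldl_cons, hs] at h ⊢
    have hle : n0 ≤ n1 := by have := aStep_count_le st0 n0 c; rw [hs] at this; exact this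
    have hmono := foldl_count_mono rest st1 n1
    have hn1 : n1 = n0 := by omega
    subst hn1
    have hst1 : st1 = c :: st0 := by
      have := aStep_count_eq st0 n1 c (by rw [hs])
      rw [hs] at this
      exact (Prod.mk.injEq _ _ _ _ ▸ this).1
    rw [ih st1 n1 h, hst1]
    simp

-- when count = 0 the reduced stack is the reversed input
theorem count_zero_stack (l : List Char) (h : (l.foldl aStep ([], 0)).2 = 0) :
    (l.foldl aStep ([], 0)).1 = l.reverse := by
  have := count_zero_stack_gen l [] 0 h
  simpa using this

-- the split of t at j = rfind('0')+1 is reverse-dropWhile / reverse-takeWhile of the reversed list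
theorem take_drop_split (t : List Char) (j : Nat)
    (hj : j = t.length - (t.reverse.takeWhile (· ≠ '0')).length) :
    t.take j = (t.reverse.dropWhile (· ≠ '0')).reverse ∧
    t.drop j = (t.reverse.takeWhile (· ≠ '0')).reverse := by
  have hsplit : t = (t.reverse.dropWhile (· ≠ '0')).reverse ++
      (t.reverse.takeWhile (· ≠ '0')).reverse := by
    conv_lhs => rw [← t.reverse_reverse]
    conv_lhs => rw [← List.takeWhile_append_dropWhile (p := (· ≠ '0')) (l := t.reverse)]
    rw [List.reverse_append]
  have hlen : (t.reverse.takeWhile (· ≠ '0')).length +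
      (t.reverse.dropWhile (· ≠ '0')).length = t.length := by
    have := congrArg List.length
      (List.takeWhile_append_dropWhile (p := (· ≠ '0')) (l := t.reverse))
    simp only [List.length_append, List.length_reverse] at this
    exact this
  have hjlen : j = ((t.reverse.dropWhile (· ≠ '0')).reverse).length := by
    simp only [List.length_reverse]
    omega
  constructor
  · conv_lhs => rw [hsplit, hjlen]
    exact List.take_left ..
  · conv_lhs => rw [hsplit, hjlen]
    exact List.drop_left ..

-- over '0'/'1' characters the predicates "is '1'" and "is not '0'" coincide
theorem takeWhile_binary (l : List Char) (h : ∀ c ∈ l, c = '0' ∨ c = '1') :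
    l.takeWhile (· = '1') = l.takeWhile (· ≠ '0') ∧
    l.dropWhile (· = '1') = l.dropWhile (· ≠ '0') := by
  induction l with
  | nil => simp
  | cons c rest ih =>
    rcases h c (by simp) with hc | hc <;> subst hc
    · simp
    · have := ih (fun d hd => h d (by simp [hd]))
      simp [this.1, this.2]

-- per-string equality of the two ports under the per-string precondition
theorem body_eq (x : String)
    (hx : (!PySem.Str.isIn "110" x || x.toList.all (fun c => c == '0' || c == '1')) = true) :
    (let r := x.toList.foldl aStep ([], 0)
     if r.2 = 0 then x
     else
       let p := aPop r.1 []
       String.ofList (aDump p.2 (aPrepend110 r.2 p.1)))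
    =
    (let r := bLoop x.toList 0
     let j := (PySem.Chars.rfind r.1 ['0'] + 1).toNat
     String.ofList (r.1.take j ++ (List.replicate r.2 ['1', '1', '0']).flatten ++ r.1.drop j)) := by
  simp only []
  have hB := bLoop_spec x.toList 0
  rcases hF : x.toList.foldl aStep ([], 0) with ⟨st, count⟩
  rw [hF] at hB
  have hb1 : (bLoop x.toList 0).1 = st.reverse := by
    simpa using congrArg List.reverse hB.1
  have hb2 : (bLoop x.toList 0).2 = count := by simpa using hB.2
  rw [hb1, hb2]
  -- the insertion index of B, via the rfind characterisation
  have hrf := rfind_zero_succ st.reverse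
  rw [List.reverse_reverse] at hrf
  have hwle : (st.takeWhile (· ≠ '0')).length ≤ st.length :=
    (List.takeWhile_sublist (l := st) _).length_le
  have hj : (PySem.Chars.rfind st.reverse ['0'] + 1).toNat =
      st.reverse.length - (st.takeWhile (· ≠ '0')).length := by
    rw [List.length_reverse] at hrf ⊢
    omega
  have hsplit := take_drop_split st.reverse
    ((PySem.Chars.rfind st.reverse ['0'] + 1).toNat)
    (by rw [hj, List.reverse_reverse])
  rw [List.reverse_reverse] at hsplit
  by_cases hc : count = 0
  · subst hc
    rw [if_pos rfl]
    have hst : st = x.toList.reverse := by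
      have := count_zero_stack x.toList (by rw [hF])
      rw [hF] at this
      exact this
    rw [hst, List.reverse_reverse]
    simp only [List.replicate_zero, List.flatten_nil, List.append_nil,
      List.take_append_drop, String.ofList_toList]
  · rw [if_neg hc]
    -- count > 0 forces a '110' occurrence in x, hence x is all '0'/'1'
    have hocc : (['1', '1', '0'] <:+: x.toList) := by
      by_contra hno
      have := foldl_nf x.toList [] 0 (by simpa using hno)
      rw [hF] at this
      exact hc (congrArg Prod.snd this)
    have hbin : ∀ c ∈ x.toList, c = '0' ∨ c = '1' := by
      have hIn : PySem.Str.isIn "110" x = true := by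
        rw [PySem.Str.isIn_iff_infix]
        simpa using hocc
      rw [hIn] at hx
      simp only [Bool.not_true, Bool.false_or, List.all_eq_true] at hx
      intro c hcm
      have := hx c hcm
      rcases Bool.or_eq_true_iff.mp this with h' | h'
      · exact Or.inl (by simpa using h')
      · exact Or.inr (by simpa using h')
    have hbst : ∀ c ∈ st, c = '0' ∨ c = '1' := by
      intro c hcm
      have : c ∈ ([] : List Char) ∨ c ∈ x.toList :=
        foldl_mem x.toList [] 0 c (by rw [hF]; exact hcm)
      rcases this with h' | h'
      · simp at h'
      · exact hbin c h'
    have htw := takeWhile_binary st hbst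
    rw [aPop_eq, aDump_eq, aPrepend110_eq, hsplit.1, hsplit.2]
    rw [← htw.1, ← htw.2, takeWhile_ones_reverse]
    simp [List.append_assoc]

-- ===== VERDICT (by name: the statement is the Claim_ definition above) =====
theorem solution_spec : Claim_equal_solution := by
  intro s _ hpre
  unfold Spec_solution solution solution_alt
  unfold Pre_solution at hpre
  rw [List.all_eq_true] at hpre
  exact List.map_congr_left (fun x hx => body_eq x (hpre x hx))
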